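-- pv_equiv track=rewrite | github.com/C0mm0n-User/CryptProgram | utils.py | word_to_sequence_encrypt
-- ===== SOURCE A (Python) =====
-- def word_to_sequence_encrypt(key):
--     """
--
--     :param key:
--     :return:
--     """
--     sequence = []
--     abc = 'abcdefghijklmnopqrstuvwxyzабвгдеёжзийклмнопрстуфхцчшщъыьэюя'
--     for letter in abc:
--         var = 0
--         for symbol in key:
--             var += 1
--             if symbol == letter:
--                 sequence.append(var-1)
--     return sequence
-- ===== SOURCE B (Python) =====
-- def word_to_sequence_encrypt(key):
--     """
--
--     :param key:
--     :return:
--     """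
--     abc = 'abcdefghijklmnopqrstuvwxyzабвгдеёжзийклмнопрстуфхцчшщъыьэюя'
--     buckets = {}
--     for pos, symbol in enumerate(key):
--         buckets.setdefault(symbol, []).append(pos)
--     sequence = []
--     for letter in abc:
--         sequence.extend(buckets.get(letter, []))
--     return sequence
-- ===== Notes on version B (the rewrite author's own statement) =====
-- stated objective: faster
-- what changed: One pass over the key builds a dict mapping each symbol to its list of positions, then the per-letter results are concatenated in alphabet order, removing A's inner scan of the whole key for every alphabet letter.
import Mathlib
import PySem

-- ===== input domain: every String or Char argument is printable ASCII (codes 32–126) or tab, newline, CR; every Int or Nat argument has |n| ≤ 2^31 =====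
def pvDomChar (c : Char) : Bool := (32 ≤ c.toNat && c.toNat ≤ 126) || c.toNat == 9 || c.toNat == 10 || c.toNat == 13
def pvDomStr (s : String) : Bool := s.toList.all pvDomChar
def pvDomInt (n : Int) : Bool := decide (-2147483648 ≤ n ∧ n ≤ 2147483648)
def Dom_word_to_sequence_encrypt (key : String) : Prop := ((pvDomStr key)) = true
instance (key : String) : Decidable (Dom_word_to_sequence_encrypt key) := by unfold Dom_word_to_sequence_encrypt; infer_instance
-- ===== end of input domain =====

-- B builds a position-index dict in one pass over the key and concatenates the buckets in
-- alphabet order, instead of A's scan of the whole key for every alphabet letter.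


def pvAbc : String := "abcdefghijklmnopqrstuvwxyzабвгдеёжзийклмнопрстуфхцчшщъыьэюя"

-- ===== PORT A =====
def word_to_sequence_encrypt (key : String) : List Int :=
  pvAbc.toList.foldl
    (fun sequence letter =>
      (key.toList.foldl
        (fun (st : List Int × Int) symbol =>
          let var := st.2 + 1
          if symbol = letter then (st.1 ++ [var - 1], var) else (st.1, var))
        (sequence, 0)).1)
    []

-- ===== PORT B =====
def word_to_sequence_encrypt_alt (key : String) : List Int :=
  let buckets : PySem.Dict Char (List Int) :=
    (PySem.List.enumerate key.toList).foldl
      (fun d p => d.modify p.2 [] (· ++ [p.1])) PySem.Dict.empty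
  pvAbc.toList.foldl (fun sequence letter => sequence ++ buckets.getD letter []) []

-- ===== PRECONDITION & SPEC =====
def Spec_word_to_sequence_encrypt (key : String) (out : List Int) : Prop := out = word_to_sequence_encrypt_alt key
instance (key : String) (out : List Int) : Decidable (Spec_word_to_sequence_encrypt key out) := by unfold Spec_word_to_sequence_encrypt; infer_instance

-- ===== CLAIM (what is proved, stated in full; the proofs are below) =====
def Claim_equal_word_to_sequence_encrypt : Prop := ∀ (key : String), Dom_word_to_sequence_encrypt key → Spec_word_to_sequence_encrypt key (word_to_sequence_encrypt key)

-- ===== LEMMAS AND PROOFS =====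

-- positions of `letter` in `l`, counting from `n`
def pvPos (letter : Char) (l : List Char) (n : Int) : List Int :=
  ((PySem.List.enumerate l n).filter (fun p => p.2 == letter)).map (·.1)

lemma pvPos_cons (letter x : Char) (l : List Char) (n : Int) :
    pvPos letter (x :: l) n =
      (if x = letter then [n] else []) ++ pvPos letter l (n + 1) := by
  simp [pvPos, PySem.List.enumerate_cons]
  split_ifs with h <;> simp [h]

-- A's inner loop computes the positions of `letter`
lemma inner_loop (letter : Char) (l : List Char) (seq : List Int) (n : Int) :
    (l.foldl
      (fun (st : List Int × Int) symbol =>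
        let var := st.2 + 1
        if symbol = letter then (st.1 ++ [var - 1], var) else (st.1, var))
      (seq, n)).1 = seq ++ pvPos letter l n := by
  induction l generalizing seq n with
  | nil => simp [pvPos]
  | cons x l ih =>
      simp only [List.foldl_cons, pvPos_cons]
      split_ifs with h
      · simpa [h] using ih (seq ++ [n]) (n + 1)
      · simpa [h] using ih seq (n + 1)

-- B's dict pass: each bucket holds the positions of its letter
lemma bucket_getD (c : Char) (l : List (Int × Char)) (d : PySem.Dict Char (List Int)) :
    (l.foldl (fun d p => d.modify p.2 [] (· ++ [p.1])) d).getD c [] =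
      d.getD c [] ++ (l.filter (fun p => p.2 == c)).map (·.1) := by
  induction l generalizing d with
  | nil => simp
  | cons p l ih =>
      simp only [List.foldl_cons, List.filter_cons, ih]
      rw [PySem.Dict.getD_modify]
      by_cases h : p.2 = c
      · simp [h]
      · simp [h, Ne.symm h]

-- ===== VERDICT (by name: the statement is the Claim_ definition above) =====
theorem word_to_sequence_encrypt_spec : Claim_equal_word_to_sequence_encrypt := by
  intro key _
  show word_to_sequence_encrypt key = word_to_sequence_encrypt_alt key
  unfold word_to_sequence_encrypt word_to_sequence_encrypt_alt
  simp only [inner_loop, bucket_getD, PySem.Dict.getD_empty, List.nil_append]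
  rfl
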